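-- pv_equiv track=rewrite | github.com/ly4k/Certipy | certipy/formatting.py | dn_to_components
-- ===== SOURCE A (Python) =====
-- def dn_to_components(dn: str) -> list[tuple["str", "str"]]:
--     components = []
--     component = ""
--     escape_sequence = False
--     for c in dn:
--         if c == "\\":
--             escape_sequence = True
--         elif escape_sequence and c != " ":
--             escape_sequence = False
--         elif c == ",":
--             if "=" in component:
--                 attr_name, _, value = component.partition("=")
--                 component = (attr_name, value)
--                 components.append(component)
--                 component = ""
--                 continue
--
--         component += c
--
--     attr_name, _, value = component.partition("=")
--     component = (attr_name, value)
--     components.append(component)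
--     return components
-- ===== SOURCE B (Python) =====
-- def dn_to_components(dn: str) -> list[tuple[str, str]]:
--     # pass 1: find the indices of the commas that separate components
--     cuts = []
--     esc = False
--     has_eq = False
--     for i, c in enumerate(dn):
--         if c == "\\":
--             esc = True
--         elif esc and c != " ":
--             esc = False
--         elif c == "," and has_eq:
--             cuts.append(i)
--             has_eq = False
--             continue
--         if c == "=":
--             has_eq = True
--     # pass 2: slice the DN at those commas and split each piece at its first "="
--     bounds = [-1] + cuts + [len(dn)]
--     segs = [dn[bounds[k] + 1 : bounds[k + 1]] for k in range(len(bounds) - 1)]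
--     return [(s.partition("=")[0], s.partition("=")[2]) for s in segs]
-- ===== Notes on version B (the rewrite author's own statement) =====
-- stated objective: alternative
-- what changed: B separates boundary-finding from parsing: one pass records the indices of the separating commas (with the same escape and has-equals rules, tracked by a flag), then the DN is sliced at those indices and each slice is split at its first equals sign; A instead interleaves character accumulation, membership tests and parsing in a single loop.
import Mathlib
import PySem

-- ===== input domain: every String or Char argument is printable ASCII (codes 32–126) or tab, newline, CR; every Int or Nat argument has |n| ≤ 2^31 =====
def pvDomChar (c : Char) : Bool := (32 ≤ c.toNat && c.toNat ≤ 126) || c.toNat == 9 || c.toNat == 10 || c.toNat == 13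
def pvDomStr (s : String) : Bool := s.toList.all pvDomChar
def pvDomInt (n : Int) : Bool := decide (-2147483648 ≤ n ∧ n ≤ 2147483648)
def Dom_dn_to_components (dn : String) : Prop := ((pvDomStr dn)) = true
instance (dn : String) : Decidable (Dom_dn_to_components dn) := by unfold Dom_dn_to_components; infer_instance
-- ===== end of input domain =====

-- B scans once to record the indices of the separating commas, then slices the DN at
-- those indices and splits each slice at its first '='; same return value as A
-- (objective: alternative decomposition — boundary finding separated from parsing).

-- shared port of Python's str.partition("="): (before, after); ("", s-minus-first-char never: no '=' → (s, ""))
def pvPartEq : List Char → List Char × List Char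
  | [] => ([], [])
  | c :: rest =>
    if c = '=' then ([], rest)
    else
      let p := pvPartEq rest
      (c :: p.1, p.2)

-- ===== PORT A =====
def pvStepA (st : List (String × String) × List Char × Bool) (c : Char) :
    List (String × String) × List Char × Bool :=
  if c = '\\' then (st.1, st.2.1 ++ [c], true)
  else if st.2.2 ∧ c ≠ ' ' then (st.1, st.2.1 ++ [c], false)
  else if c = ',' then
    if '=' ∈ st.2.1 then
      (st.1 ++ [(String.ofList (pvPartEq st.2.1).1, String.ofList (pvPartEq st.2.1).2)], [], st.2.2)
    else (st.1, st.2.1 ++ [c], st.2.2)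
  else (st.1, st.2.1 ++ [c], st.2.2)

def dn_to_components (dn : String) : List (String × String) :=
  let st := dn.toList.foldl pvStepA ([], [], false)
  st.1 ++ [(String.ofList (pvPartEq st.2.1).1, String.ofList (pvPartEq st.2.1).2)]

-- ===== PORT B =====
-- pass 1 step: state (cuts, esc, has_eq), input (index, char)
def pvStepB (st : List Int × Bool × Bool) (ic : Int × Char) : List Int × Bool × Bool :=
  if ic.2 = '\\' then (st.1, true, if ic.2 = '=' then true else st.2.2)
  else if st.2.1 ∧ ic.2 ≠ ' ' then (st.1, false, if ic.2 = '=' then true else st.2.2)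
  else if ic.2 = ',' ∧ st.2.2 then (st.1 ++ [ic.1], st.2.1, false)
  else (st.1, st.2.1, if ic.2 = '=' then true else st.2.2)

def dn_to_components_alt (dn : String) : List (String × String) :=
  let s := dn.toList
  let cuts := ((PySem.List.enumerate s).foldl pvStepB ([], false, false)).1
  let segs := ((cuts ++ [(s.length : Int)]).foldl
      (fun (st : List (List Char) × Int) (cut : Int) =>
        (st.1 ++ [PySem.List.slice s (some st.2) (some cut)], cut + 1)) ([], 0)).1
  segs.map (fun t => (String.ofList (pvPartEq t).1, String.ofList (pvPartEq t).2))

-- ===== PRECONDITION & SPEC =====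
def Spec_dn_to_components (dn : String) (out : List (String × String)) : Prop := out = dn_to_components_alt dn
instance (dn : String) (out : List (String × String)) : Decidable (Spec_dn_to_components dn out) := by unfold Spec_dn_to_components; infer_instance

-- ===== CLAIM (what is proved, stated in full; the proofs are below) =====
def Claim_equal_dn_to_components : Prop := ∀ (dn : String), Dom_dn_to_components dn → Spec_dn_to_components dn (dn_to_components dn)

-- ===== LEMMAS AND PROOFS =====

def pvParse (t : List Char) : String × String :=
  (String.ofList (pvPartEq t).1, String.ofList (pvPartEq t).2)

-- reference: the raw segments, computed directly
def pvSegs : List Char → Bool → List Char → List (List Char)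
  | [], _, acc => [acc]
  | c :: t, esc, acc =>
    if c = '\\' then pvSegs t true (acc ++ [c])
    else if esc ∧ c ≠ ' ' then pvSegs t false (acc ++ [c])
    else if c = ',' then
      if '=' ∈ acc then acc :: pvSegs t esc []
      else pvSegs t esc (acc ++ [c])
    else pvSegs t esc (acc ++ [c])

-- reference cut indices (Nat)
def pvCuts : List Char → Nat → Bool → Bool → List Nat
  | [], _, _, _ => []
  | c :: t, i, esc, heq =>
    if c = '\\' then pvCuts t (i+1) true (if c = '=' then true else heq)
    else if esc ∧ c ≠ ' ' then pvCuts t (i+1) false (if c = '=' then true else heq)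
    else if c = ',' ∧ heq then i :: pvCuts t (i+1) esc false
    else pvCuts t (i+1) esc (if c = '=' then true else heq)

-- slices determined by cut indices
def pvSegsFrom (s : List Char) : Nat → List Nat → List (List Char)
  | start, [] => s.drop start
      |> (fun u => [u])
  | start, c :: cs => (s.drop start).take (c - start) :: pvSegsFrom s (c+1) cs

theorem pvA_fold (t : List Char) : ∀ (comps : List (String × String)) (acc : List Char) (esc : Bool),
    (t.foldl pvStepA (comps, acc, esc)).1 ++ [pvParse (t.foldl pvStepA (comps, acc, esc)).2.1]
      = comps ++ (pvSegs t esc acc).map pvParse := by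
  induction t with
  | nil => intro comps acc esc; simp [pvSegs, pvParse]
  | cons c t ih =>
    intro comps acc esc
    simp only [List.foldl_cons, pvStepA, pvSegs]
    split_ifs with h1 h2 h3 h4
    · exact (ih ..).trans (by simp)
    · exact (ih ..).trans (by simp)
    · exact (ih ..).trans (by simp [pvParse])
    · exact (ih ..).trans (by simp)
    · exact (ih ..).trans (by simp)

theorem pvB_cuts_fold (t : List Char) : ∀ (i : Nat) (cuts : List Int) (esc heq : Bool),
    ((PySem.List.enumerate t (i : Int)).foldl pvStepB (cuts, esc, heq)).1
      = cuts ++ (pvCuts t i esc heq).map (fun (n : Nat) => (n : Int)) := by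
  induction t with
  | nil => intro i cuts esc heq; simp [PySem.List.enumerate_nil, pvCuts]
  | cons c t ih =>
    intro i cuts esc heq
    rw [PySem.List.enumerate_cons]
    have hcast : (i : Int) + 1 = ((i + 1 : Nat) : Int) := by push_cast; ring
    simp only [List.foldl_cons, pvStepB, pvCuts]
    split_ifs <;> (rw [hcast]; exact (ih ..).trans (by simp))

theorem pvB_segs_fold (s : List Char) (cs : List Nat) : ∀ (segs0 : List (List Char)) (start : Nat),
    (((cs.map (fun (n : Nat) => (n : Int))) ++ [(s.length : Int)]).foldl
      (fun (st : List (List Char) × Int) (cut : Int) =>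
        (st.1 ++ [PySem.List.slice s (some st.2) (some cut)], cut + 1)) (segs0, (start : Int))).1
      = segs0 ++ pvSegsFrom s start cs := by
  induction cs with
  | nil =>
    intro segs0 start
    rw [List.map_nil, List.nil_append, List.foldl_cons, List.foldl_nil]
    show segs0 ++ [PySem.List.slice s (some (start : Int)) (some (s.length : Int))]
        = segs0 ++ pvSegsFrom s start []
    rw [PySem.List.slice_natCast]
    show segs0 ++ [(s.drop start).take (s.length - start)] = segs0 ++ [s.drop start]
    rw [List.take_of_length_le (by simp)]
  | cons c cs ih =>
    intro segs0 start
    have hcast : (c : Int) + 1 = ((c + 1 : Nat) : Int) := by push_cast; ring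
    rw [List.map_cons, List.cons_append, List.foldl_cons]
    show (((cs.map (fun (n : Nat) => (n : Int))) ++ [(s.length : Int)]).foldl _
        (segs0 ++ [PySem.List.slice s (some (start : Int)) (some (c : Int))], (c : Int) + 1)).1 = _
    rw [hcast]
    exact (ih ..).trans (by simp [PySem.List.slice_natCast, pvSegsFrom])

theorem pv_take_succ {s : List Char} {i start : Nat} {c : Char} {t : List Char}
    (hd : s.drop i = c :: t) (hle : start ≤ i) :
    (s.drop start).take (i + 1 - start) = (s.drop start).take (i - start) ++ [c] := by
  have hlen : i < s.length := by
    by_contra h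
    have : s.drop i = [] := List.drop_eq_nil_of_le (by omega)
    rw [this] at hd; exact (List.cons_ne_nil _ _ hd.symm).elim
  have hget : s.drop start = (s.drop start).take (i - start) ++ (c :: t) := by
    conv_lhs => rw [← List.take_append_drop (i - start) (s.drop start)]
    rw [List.drop_drop]
    have : start + (i - start) = i := by omega
    rw [this, hd]
  have hlen2 : ((s.drop start).take (i - start)).length = i - start := by
    simp [List.length_take, List.length_drop]; omega
  have h1 : s.drop start = ((s.drop start).take (i - start) ++ [c]) ++ t := by
    rw [List.append_assoc, List.singleton_append]; exact hget
  have h2 : i + 1 - start = ((s.drop start).take (i - start) ++ [c]).length := by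
    simp [hlen2]; omega
  conv_lhs => rw [h1, h2, List.take_left]

theorem pv_drop_succ {s : List Char} {i : Nat} {c : Char} {t : List Char}
    (hd : s.drop i = c :: t) : s.drop (i + 1) = t := by
  rw [← List.drop_drop, hd]; simp

theorem pv_main (s : List Char) : ∀ (t : List Char) (i start : Nat) (esc : Bool),
    start ≤ i → s.drop i = t →
    pvSegsFrom s start (pvCuts t i esc (decide ('=' ∈ (s.drop start).take (i - start))))
      = pvSegs t esc ((s.drop start).take (i - start)) := by
  intro t
  induction t with
  | nil =>
    intro i start esc hle hd
    have hlen : s.length ≤ i := by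
      by_contra h
      have := List.drop_eq_nil_iff.mp hd; omega
    simp only [pvCuts, pvSegs, pvSegsFrom]
    rw [List.take_of_length_le (by simp [List.length_drop]; omega)]
  | cons c t ih =>
    intro i start esc hle hd
    have htake := pv_take_succ hd hle
    have hdrop := pv_drop_succ hd
    have hle' : start ≤ i + 1 := by omega
    have hh : (if c = '=' then true else decide ('=' ∈ (s.drop start).take (i - start)))
        = decide ('=' ∈ (s.drop start).take (i + 1 - start)) := by
      rw [htake]
      by_cases hc : c = '='
      · subst hc; simp
      · have hc' : '=' ≠ c := fun h => hc h.symm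
        simp [hc, hc']
    simp only [pvCuts, pvSegs]
    rw [hh, ← htake]
    split_ifs with h1 h2 h3 h4 h5 h6
    all_goals try exact ih (i+1) start _ hle' hdrop
    all_goals try (exact absurd (by simpa using h3.2) ‹¬ ('=' ∈ (s.drop start).take (i - start))›)
    all_goals try (exact congrArg (List.cons _) (by simpa using ih (i+1) (i+1) esc (le_refl _) hdrop))
    all_goals simp_all

theorem pv_eq (dn : String) : dn_to_components dn = dn_to_components_alt dn := by
  have hA : dn_to_components dn = (pvSegs dn.toList false []).map pvParse := by
    simpa [dn_to_components, pvParse] using pvA_fold dn.toList [] [] false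
  have h1 := pvB_cuts_fold dn.toList 0 [] false false
  have h2 := pvB_segs_fold dn.toList (pvCuts dn.toList 0 false false) [] 0
  simp only [Nat.cast_zero, List.nil_append] at h1 h2
  have hB : dn_to_components_alt dn
      = (pvSegsFrom dn.toList 0 (pvCuts dn.toList 0 false false)).map pvParse := by
    simp only [dn_to_components_alt]
    rw [h1, h2]
    rfl
  have hM := pv_main dn.toList dn.toList 0 0 false (le_refl _) (by simp)
  simp only [Nat.sub_zero, List.take_zero, List.drop_zero, List.not_mem_nil,
    decide_false] at hM
  rw [hA, hB, hM]

-- ===== VERDICT (by name: the statement is the Claim_ definition above) =====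
theorem dn_to_components_spec : Claim_equal_dn_to_components := by
  intro dn _
  unfold Spec_dn_to_components
  exact pv_eq dn
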